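-- pv_equiv track=rewrite | github.com/jwrr/gefme | gefme.py | jumble
-- ===== SOURCE A (Python) =====
-- def msb(i, n, isize=64):
--   i2 = i & (2**isize - 1)
--   i3 = i2 >> (isize-n)
--   return i3
--
-- def getbits(i, ubit=0, lbit=0):
--   numbits = ubit-lbit+1
--   bits = msb(i, numbits, ubit+1)
--   return bits
--
-- def getbit(i, bitpos=0):
--   return getbits(i, bitpos, bitpos)
--
-- def getnibble(i, n):
--   nibble = getbits(i, n*4+3, n*4)
--   return nibble
--
-- def invert(i, n=64):
--   mask = 2**n - 1
--   i2 = i ^ mask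
--   return i2
--
-- def rotl(i, n, isize=64):
--   i2 = (i << n)
--   lower = i2 >> isize
--   upper = i2 & (2**isize-1)
--   i3 = upper | lower
--   return i3
--
-- def prime(i):
--       #0  1  2  3   4   5   6   7   8   9  10  11  12  13  14  15  16    17  18  19  20  21  22  23  24   25
--   p = [2, 3, 5, 7, 11, 13, 17, 19, 23, 29, 31, 37, 41, 43, 47, 53, 59,   61, 67, 71, 73, 79, 83, 89, 97, 101,
--        103, 107, 109, 113, 127, 131, 137, 139, 149, 151, 157, 163, 167, 173, 179, 181, 191, 193, 197, 199, 211,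
--        223, 227, 229, 233, 239, 241, 251, 257, 263, 269, 271, 277, 281, 283, 293, 307, 311, 313, 317, 331, 337,
--        347, 349, 353, 359, 367, 373, 379, 383, 389, 397, 401, 409, 419, 421, 431, 433, 439, 443, 449, 457, 461,
--        463, 467, 479, 487, 491, 499, 503, 509, 521, 523, 541]
--   return p[i]
--
-- def getcmd(k, i, isize=64):
--   ptr = getnibble(k, i)
--   cmd = getnibble(k, ptr) + 1
--   rot_cmd = prime(cmd)
--   add_cmd = (cmd & 0x7) + 1
--   inv_cmd = getbit(k, cmd*3%isize)
--   rev_cmd = getbit(k, cmd*7%isize)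
--   return rot_cmd, inv_cmd, rev_cmd, add_cmd
--
-- def add(val, n, wid = 4, isize=64):
--   m = 2**wid - 1
--   for i in range(0, isize, wid):
--     v = getbits(val, i+wid-1, i) + n
--     v = (v & m) << i
--     mshifted = invert(m << i, isize)
--     val = (val & mshifted) | v
--   return val
--
-- def jumble(v, k, n=2, isize=64, id='x'):
--   for i in range(n):
--     rot_cmd, inv_cmd, rev_cmd, add_cmd = getcmd(k, i, isize)
--     v = add(v, add_cmd, 4, isize)
--     v = rotl(v, rot_cmd, isize)
--     v = invert(v, isize) if inv_cmd==0 else v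
-- #     v = rev(v, isize)
--     v = v ^ k
--   return v
-- ===== SOURCE B (Python) =====
-- # Same jumble as A, but the per-nibble add is a SWAR closed form (no loop over
-- # the isize/4 nibble fields) and the per-round commands are read with direct
-- # shift-and-mask arithmetic instead of A's helper tower.
--
-- _PRIMES = [2, 3, 5, 7, 11, 13, 17, 19, 23, 29, 31, 37, 41, 43, 47, 53, 59, 61,
--            67, 71, 73, 79, 83, 89, 97, 101, 103, 107, 109, 113, 127, 131, 137,
--            139, 149, 151, 157, 163, 167, 173, 179, 181, 191, 193, 197, 199, 211,
--            223, 227, 229, 233, 239, 241, 251, 257, 263, 269, 271, 277, 281, 283,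
--            293, 307, 311, 313, 317, 331, 337, 347, 349, 353, 359, 367, 373, 379,
--            383, 389, 397, 401, 409, 419, 421, 431, 433, 439, 443, 449, 457, 461,
--            463, 467, 479, 487, 491, 499, 503, 509, 521, 523, 541]
--
-- def jumble(v, k, n=2, isize=64, id='x'):
--     for i in range(n):
--         # decode the round's commands straight out of k
--         ptr = (k >> (4 * i)) & 15
--         cmd = ((k >> (4 * ptr)) & 15) + 1
--         rot_cmd = _PRIMES[cmd]
--         add_cmd = (cmd & 0x7) + 1
--         inv_cmd = (k >> (cmd * 3 % isize)) & 1
--         # SWAR: add add_cmd to every 4-bit field of v at once, wrapping mod 16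
--         chunks = (isize + 3) // 4
--         full = (1 << isize) - 1
--         rep = ((1 << (4 * chunks)) - 1) // 15      # 0x111...1, one per nibble
--         high = 8 * rep                             # 0x888...8, nibble high bits
--         x = v & full
--         b = add_cmd * rep
--         v = ((x & ~high) + (b & ~high)) ^ ((x ^ b) & high)
--         # rotate left by rot_cmd within isize bits
--         t = v << rot_cmd
--         v = (t & full) | (t >> isize)
--         if inv_cmd == 0:
--             v ^= full
--         v ^= k
--     return v
-- ===== Notes on version B (the rewrite author's own statement) =====
-- stated objective: faster
-- what changed: The inner per-nibble add loop (isize/4 Python iterations of mask/shift/or per round) is replaced by a SWAR closed form that adds add_cmd to all 4-bit fields at once in a constant number of big-int operations, and the command decoding reads nibbles/bits of k directly with shift-and-mask instead of A's msb/getbits helper tower.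
-- outside the precondition, e.g. on jumble(2, 0, 1, 1, 'x'): A returns 25, B returns 9; on jumble(7, 3, 2, 2, 'x'): A returns 7171, B returns 3075
import Mathlib
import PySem

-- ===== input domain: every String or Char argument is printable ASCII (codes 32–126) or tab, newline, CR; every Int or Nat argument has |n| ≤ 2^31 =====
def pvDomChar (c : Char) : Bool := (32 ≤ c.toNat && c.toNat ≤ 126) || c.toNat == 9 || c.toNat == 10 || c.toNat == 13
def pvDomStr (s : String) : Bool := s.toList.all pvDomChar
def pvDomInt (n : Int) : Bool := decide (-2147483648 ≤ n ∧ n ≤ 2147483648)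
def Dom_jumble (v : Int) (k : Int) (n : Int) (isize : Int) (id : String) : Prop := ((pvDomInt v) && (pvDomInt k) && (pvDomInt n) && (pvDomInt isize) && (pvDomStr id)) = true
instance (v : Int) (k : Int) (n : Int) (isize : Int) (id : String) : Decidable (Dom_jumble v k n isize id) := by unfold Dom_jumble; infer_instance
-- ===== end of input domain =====

-- B replaces A's per-nibble add loop by a SWAR closed form (constant number of
-- big-int operations per round) and reads the round commands from k by direct
-- shift-and-mask; return value only, no side effects in either version.

-- ===== PORT A =====
def pvMsb (i : Int) (n : Int) (isize : Int) : Int :=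
  let i2 := PySem.Int.band i (2 ^ isize.toNat - 1)
  i2 >>> (isize - n).toNat

def pvGetbits (i : Int) (ubit : Int) (lbit : Int) : Int :=
  let numbits := ubit - lbit + 1
  pvMsb i numbits (ubit + 1)

def pvGetbit (i : Int) (bitpos : Int) : Int :=
  pvGetbits i bitpos bitpos

def pvGetnibble (i : Int) (n : Int) : Int :=
  pvGetbits i (n * 4 + 3) (n * 4)

def pvInvert (i : Int) (n : Int) : Int :=
  let mask := 2 ^ n.toNat - 1
  PySem.Int.bxor i mask

def pvRotl (i : Int) (n : Int) (isize : Int) : Int :=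
  let i2 := i <<< n.toNat
  let lower := i2 >>> isize.toNat
  let upper := PySem.Int.band i2 (2 ^ isize.toNat - 1)
  PySem.Int.bor upper lower

def pvPrimeList : List Int :=
  [2, 3, 5, 7, 11, 13, 17, 19, 23, 29, 31, 37, 41, 43, 47, 53, 59, 61,
   67, 71, 73, 79, 83, 89, 97, 101, 103, 107, 109, 113, 127, 131, 137,
   139, 149, 151, 157, 163, 167, 173, 179, 181, 191, 193, 197, 199, 211,
   223, 227, 229, 233, 239, 241, 251, 257, 263, 269, 271, 277, 281, 283,
   293, 307, 311, 313, 317, 331, 337, 347, 349, 353, 359, 367, 373, 379,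
   383, 389, 397, 401, 409, 419, 421, 431, 433, 439, 443, 449, 457, 461,
   463, 467, 479, 487, 491, 499, 503, 509, 521, 523, 541]

-- p[i] with i provably in range on every reached call (cmd ∈ [1,16])
def pvPrime (i : Int) : Int := PySem.List.pyGetD pvPrimeList i 0

def pvGetcmd (k : Int) (i : Int) (isize : Int) : Int × Int × Int × Int :=
  let ptr := pvGetnibble k i
  let cmd := pvGetnibble k ptr + 1
  let rot_cmd := pvPrime cmd
  let add_cmd := PySem.Int.band cmd 0x7 + 1
  let inv_cmd := pvGetbit k (PySem.Int.mod (cmd * 3) isize)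
  let rev_cmd := pvGetbit k (PySem.Int.mod (cmd * 7) isize)
  (rot_cmd, inv_cmd, rev_cmd, add_cmd)

def pvAdd (val : Int) (n : Int) (wid : Int) (isize : Int) : Int :=
  let m := 2 ^ wid.toNat - 1
  (PySem.List.pyRange 0 isize wid).foldl (fun val i =>
    let v := pvGetbits val (i + wid - 1) i + n
    let v2 := (PySem.Int.band v m) <<< i.toNat
    let mshifted := pvInvert (m <<< i.toNat) isize
    PySem.Int.bor (PySem.Int.band val mshifted) v2) val

def jumble (v : Int) (k : Int) (n : Int) (isize : Int) (id : String) : Int :=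
  (PySem.List.pyRange 0 n 1).foldl (fun v i =>
    let c := pvGetcmd k i isize
    let rot_cmd := c.1
    let inv_cmd := c.2.1
    let add_cmd := c.2.2.2
    let v1 := pvAdd v add_cmd 4 isize
    let v2 := pvRotl v1 rot_cmd isize
    let v3 := if inv_cmd == 0 then pvInvert v2 isize else v2
    PySem.Int.bxor v3 k) v

-- ===== PORT B =====
def pvPrimeListB : List Int :=
  [2, 3, 5, 7, 11, 13, 17, 19, 23, 29, 31, 37, 41, 43, 47, 53, 59, 61,
   67, 71, 73, 79, 83, 89, 97, 101, 103, 107, 109, 113, 127, 131, 137,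
   139, 149, 151, 157, 163, 167, 173, 179, 181, 191, 193, 197, 199, 211,
   223, 227, 229, 233, 239, 241, 251, 257, 263, 269, 271, 277, 281, 283,
   293, 307, 311, 313, 317, 331, 337, 347, 349, 353, 359, 367, 373, 379,
   383, 389, 397, 401, 409, 419, 421, 431, 433, 439, 443, 449, 457, 461,
   463, 467, 479, 487, 491, 499, 503, 509, 521, 523, 541]

def jumble_alt (v : Int) (k : Int) (n : Int) (isize : Int) (id : String) : Int :=
  (PySem.List.pyRange 0 n 1).foldl (fun v i =>
    let ptr := PySem.Int.band (k >>> (4 * i).toNat) 15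
    let cmd := PySem.Int.band (k >>> (4 * ptr).toNat) 15 + 1
    let rot_cmd := PySem.List.pyGetD pvPrimeListB cmd 0
    let add_cmd := PySem.Int.band cmd 0x7 + 1
    let inv_cmd := PySem.Int.band (k >>> (PySem.Int.mod (cmd * 3) isize).toNat) 1
    let chunks := PySem.Int.floordiv (isize + 3) 4
    let full := ((1:Int) <<< isize.toNat) - 1
    let rep := PySem.Int.floordiv (((1:Int) <<< (4 * chunks).toNat) - 1) 15
    let high := (8:Int) * rep
    let x := PySem.Int.band v full
    let b := add_cmd * rep
    let va := PySem.Int.bxor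
      (PySem.Int.band x (Int.not high) + PySem.Int.band b (Int.not high))
      (PySem.Int.band (PySem.Int.bxor x b) high)
    let t := va <<< rot_cmd.toNat
    let vr := PySem.Int.bor (PySem.Int.band t full) (t >>> isize.toNat)
    let vi := if inv_cmd == 0 then PySem.Int.bxor vr full else vr
    PySem.Int.bxor vi k) v

-- ===== PRECONDITION & SPEC =====
-- Pre_ excludes (a) the inputs where A raises: with at least one round to run
-- (n ≥ 1), isize ≤ 0 makes A hit `% isize` (ZeroDivisionError for 0) or a
-- negative shift / float mask (ValueError/TypeError for isize < 0); and
-- (b) the degenerate word sizes 1 ≤ isize ≤ 3 (with n ≥ 1), where A's single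
-- 4-bit add field overhangs the isize-bit word, so A's returned value reads and
-- keeps bits of the running value ABOVE the word width — an accident of the
-- overhanging mask that no isize-bit implementation would specify; B returns
-- the clean masked-to-isize-bits result there.
def Pre_jumble (v : Int) (k : Int) (n : Int) (isize : Int) (id : String) : Prop :=
  n ≤ 0 ∨ 4 ≤ isize
instance (v : Int) (k : Int) (n : Int) (isize : Int) (id : String) : Decidable (Pre_jumble v k n isize id) := by unfold Pre_jumble; infer_instance
def pvWitness_jumble : Int × Int × Int × Int × String := (3, 5, 2, 64, "x")

def Spec_jumble (v : Int) (k : Int) (n : Int) (isize : Int) (id : String) (out : Int) : Prop := out = jumble_alt v k n isize id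
instance (v : Int) (k : Int) (n : Int) (isize : Int) (id : String) (out : Int) : Decidable (Spec_jumble v k n isize id out) := by unfold Spec_jumble; infer_instance

-- ===== CLAIM (what is proved, stated in full; the proofs are below) =====
def Claim_equal_jumble : Prop := ∀ (v : Int) (k : Int) (n : Int) (isize : Int) (id : String), Dom_jumble v k n isize id → Pre_jumble v k n isize id → Spec_jumble v k n isize id (jumble v k n isize id)

-- ===== LEMMAS AND PROOFS =====

theorem pv_addOr (a : Nat) : ∀ b : Nat, a &&& b = 0 → a + b = a ||| b := by
  induction a using Nat.strong_induction_on with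
  | _ a ih =>
    intro b h
    rcases Nat.eq_zero_or_pos a with rfl | ha
    · simp
    have h2 : a / 2 &&& b / 2 = 0 := by rw [← Nat.and_div_two, h]
    have hbit : ¬(a % 2 = 1 ∧ b % 2 = 1) := by
      rintro ⟨h1, hb1⟩
      have := congrArg (fun x => x.testBit 0) h
      simp [Nat.testBit_land, Nat.testBit_zero, h1, hb1] at this
    have ihv := ih (a / 2) (by omega) (b / 2) h2
    have hor : (a ||| b) / 2 = a / 2 ||| b / 2 := Nat.or_div_two
    have horm : (a ||| b) % 2 = a % 2 + b % 2 := by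
      have h0 : (a ||| b).testBit 0 = (a.testBit 0 || b.testBit 0) := Nat.testBit_lor a b 0
      simp only [Nat.testBit_zero] at h0
      have h0' : ((a ||| b) % 2 = 1) ↔ (a % 2 = 1 ∨ b % 2 = 1) := by
        constructor
        · intro h; simpa [h] using h0.symm
        · intro h; rcases h with h | h <;> simpa [h] using h0
      omega
    have key : (a ||| b) = 2 * (a / 2 + b / 2) + (a % 2 + b % 2) := by
      rw [ihv, ← hor, ← horm]; omega
    omega

theorem pv_ldiff_add (a h : Nat) : a.ldiff h + (a &&& h) = a := by
  have hd : a.ldiff h &&& (a &&& h) = 0 := by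
    apply Nat.eq_of_testBit_eq
    intro i
    simp [Nat.testBit_land, Nat.testBit_ldiff]
    intro h1 h2; simp [h1, h2]
  have ho : a.ldiff h ||| (a &&& h) = a := by
    apply Nat.eq_of_testBit_eq
    intro i
    simp [Nat.testBit_lor, Nat.testBit_land, Nat.testBit_ldiff]
    cases a.testBit i <;> cases h.testBit i <;> simp
  rw [pv_addOr _ _ hd, ho]

theorem pv_sub_and (a h : Nat) : a - (a &&& h) = a.ldiff h := by
  have := pv_ldiff_add a h
  omega

theorem pv_compl (F c : Nat) (hc : c < 2 ^ F) : (2 ^ F - 1) ^^^ c = 2 ^ F - 1 - c := by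
  have hcb : ∀ i, c.testBit i = true → i < F := by
    intro i hi
    by_contra hiF
    have : c < 2 ^ i := lt_of_lt_of_le hc (Nat.pow_le_pow_right (by norm_num) (by omega))
    simp [Nat.testBit_eq_false_of_lt this] at hi
  have hd : ((2 ^ F - 1) ^^^ c) &&& c = 0 := by
    apply Nat.eq_of_testBit_eq
    intro i
    simp only [Nat.testBit_land, Nat.testBit_xor, Nat.testBit_two_pow_sub_one,
      Nat.zero_testBit]
    cases hct : c.testBit i
    · simp
    · simp [hcb i hct]
  have ho : ((2 ^ F - 1) ^^^ c) ||| c = 2 ^ F - 1 := by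
    apply Nat.eq_of_testBit_eq
    intro i
    simp only [Nat.testBit_lor, Nat.testBit_xor, Nat.testBit_two_pow_sub_one]
    cases hct : c.testBit i
    · simp
    · simp [hcb i hct]
  have := pv_addOr _ _ hd
  rw [ho] at this
  omega

theorem pv_testBit_lt {M F i : Nat} (hM : M < 2 ^ F) (h : M.testBit i = true) : i < F := by
  by_contra hiF
  have : M < 2 ^ i := lt_of_lt_of_le hM (Nat.pow_le_pow_right (by norm_num) (by omega))
  simp [Nat.testBit_eq_false_of_lt this] at h

theorem pv_pow_cast (t : Nat) : (2:Int) ^ t = ((2 ^ t : Nat) : Int) := by push_cast; ring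

theorem pv_mask_toNat (t : Nat) : ((2:Int) ^ t - 1).toNat = 2 ^ t - 1 := by
  rw [pv_pow_cast]; omega

theorem pv_mask_cast (t : Nat) : (2:Int) ^ t - 1 = ((2 ^ t - 1 : Nat) : Int) := by
  have h := Nat.one_le_two_pow (n := t)
  rw [pv_pow_cast]; omega

theorem pv_negEmod (a : Int) (ha : a < 0) (t : Nat) :
    a % (2:Int) ^ t = ((2 ^ t - 1 : Nat) : Int) - (((-a - 1).toNat % 2 ^ t : Nat) : Int) := by
  set na := (-a - 1).toNat with hna
  have hae : a = -(↑na + 1) := by omega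
  obtain ⟨q, r, hqr, hrlt⟩ : ∃ q r, na = 2 ^ t * q + r ∧ r < 2 ^ t :=
    ⟨na / 2 ^ t, na % 2 ^ t, (Nat.div_add_mod na (2 ^ t)).symm, Nat.mod_lt _ (by positivity)⟩
  have hr : na % 2 ^ t = r := by rw [hqr, Nat.mul_add_mod, Nat.mod_eq_of_lt hrlt]
  have hsplit : a = ((2:Int) ^ t - 1 - ↑r) + (2:Int) ^ t * (-(↑q + 1)) := by
    rw [hae, hqr, pv_pow_cast]; push_cast; ring
  have h1 : a % (2:Int) ^ t = ((2:Int) ^ t - 1 - ↑r) % (2:Int) ^ t := by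
    rw [hsplit, Int.add_mul_emod_self_left]
  have h2 : ((2:Int) ^ t - 1 - ↑r) % (2:Int) ^ t = (2:Int) ^ t - 1 - ↑r := by
    apply Int.emod_eq_of_lt
    · have : (↑r : Int) < 2 ^ t := by rw [pv_pow_cast]; exact_mod_cast hrlt
      omega
    · have : (0:Int) ≤ ↑r := by positivity
      omega
  rw [h1, h2, hr, pv_mask_cast]

theorem pv_band_mask (a : Int) (t : Nat) :
    PySem.Int.band a ((2:Int) ^ t - 1) = a % (2:Int) ^ t := by
  rcases (by omega : 0 ≤ a ∨ a < 0) with ha | ha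
  · rw [PySem.Int.band_of_nonneg ha (by have := Nat.one_le_two_pow (n := t); rw [pv_pow_cast]; omega)]
    rw [pv_mask_toNat, Nat.and_two_pow_sub_one_eq_mod]
    obtain ⟨m, rfl⟩ := Int.eq_ofNat_of_zero_le ha
    rw [pv_pow_cast, ← Int.natCast_mod, Int.toNat_natCast]
  · have hbge : (0:Int) ≤ (2:Int) ^ t - 1 := by
      have := Nat.one_le_two_pow (n := t); rw [pv_pow_cast]; omega
    simp only [PySem.Int.band, if_neg (by omega : ¬ 0 ≤ a), if_pos hbge]
    rw [pv_mask_toNat, Nat.and_comm, Nat.and_two_pow_sub_one_eq_mod]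
    rw [pv_negEmod a ha t]
    have h1 := Nat.mod_lt (-a - 1).toNat (y := 2 ^ t) ((by positivity))
    have h2 := Nat.one_le_two_pow (n := t)
    omega

theorem pv_band_low (a : Int) (M F : Nat) (hM : M < 2 ^ F) :
    PySem.Int.band a ((M : Nat) : Int) = PySem.Int.band (a % (2:Int) ^ F) ((M : Nat) : Int) := by
  have hpow : (0:Int) < 2 ^ F := by positivity
  have hmn : 0 ≤ a % (2:Int) ^ F := Int.emod_nonneg a (by omega)
  rcases (by omega : 0 ≤ a ∨ a < 0) with ha | ha
  · rw [PySem.Int.band_of_nonneg ha (by positivity), PySem.Int.band_of_nonneg hmn (by positivity)]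
    obtain ⟨m, rfl⟩ := Int.eq_ofNat_of_zero_le ha
    have : ((m : Int) % (2:Int) ^ F).toNat = m % 2 ^ F := by
      rw [pv_pow_cast, ← Int.natCast_mod, Int.toNat_natCast]
    rw [this]
    simp only [Int.toNat_natCast]
    congr 1
    apply Nat.eq_of_testBit_eq
    intro i
    simp only [Nat.testBit_land, Nat.testBit_mod_two_pow]
    cases hMi : M.testBit i
    · simp
    · simp [pv_testBit_lt hM hMi]
  · set na := (-a - 1).toNat with hna
    have hlhs : PySem.Int.band a ((M : Nat) : Int) = ((M.ldiff na : Nat) : Int) := by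
      simp only [PySem.Int.band, if_neg (by omega : ¬ 0 ≤ a),
        if_pos (by positivity : (0:Int) ≤ ((M:Nat):Int)), Int.toNat_natCast]
      rw [← hna, pv_sub_and]
    have htn : (a % (2:Int) ^ F).toNat = 2 ^ F - 1 - na % 2 ^ F := by
      rw [pv_negEmod a ha F, ← hna]
      have h1 := Nat.mod_lt na (y := 2 ^ F) ((by positivity))
      have h2 := Nat.one_le_two_pow (n := F)
      omega
    rw [hlhs, PySem.Int.band_of_nonneg hmn (by positivity), htn, Int.toNat_natCast]
    have hmod : na % 2 ^ F < 2 ^ F := Nat.mod_lt na ((by positivity))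
    rw [show 2 ^ F - 1 - na % 2 ^ F = (2 ^ F - 1) ^^^ (na % 2 ^ F) from (pv_compl F _ hmod).symm]
    congr 1
    apply Nat.eq_of_testBit_eq
    intro i
    simp only [Nat.testBit_land, Nat.testBit_xor, Nat.testBit_ldiff,
      Nat.testBit_two_pow_sub_one, Nat.testBit_mod_two_pow]
    cases hMi : M.testBit i
    · simp
    · cases hni : na.testBit i <;> simp [pv_testBit_lt hM hMi, hni]

theorem pv_band_not (x h : Int) (hx : 0 ≤ x) (hh : 0 ≤ h) :
    PySem.Int.band x (Int.not h) = ((x.toNat.ldiff h.toNat : Nat) : Int) := by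
  have hnot : Int.not h = -h - 1 := by
    obtain ⟨m, rfl⟩ := Int.eq_ofNat_of_zero_le hh
    show Int.not (Int.ofNat m) = _
    simp [Int.not, Int.negSucc_eq]; omega
  rw [hnot]
  simp only [PySem.Int.band, if_pos hx, if_neg (by omega : ¬ (0:Int) ≤ -h - 1)]
  rw [show -(-h - 1) - 1 = h from by ring, pv_sub_and]

theorem pv_shiftR (a : Int) (t : Nat) : a >>> t = a / (2:Int) ^ t := by
  rw [Int.shiftRight_eq_div_pow, pv_pow_cast]

theorem pv_modDiv (a : Int) (l r : Nat) :
    (a % (2:Int) ^ (l + r)) / (2:Int) ^ l = (a / (2:Int) ^ l) % (2:Int) ^ r := by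
  have hl : ((2:Int) ^ l) ≠ 0 := by positivity
  have hr : ((2:Int) ^ r) ≠ 0 := by positivity
  have h1 : a % (2:Int) ^ (l + r) = a + (-((2:Int) ^ r * (a / (2:Int) ^ (l + r)))) * (2:Int) ^ l := by
    rw [Int.emod_def]; ring
  rw [h1, Int.add_mul_ediv_right _ _ hl]
  have h2 : a / (2:Int) ^ l / (2:Int) ^ r = a / (2:Int) ^ (l + r) := by
    rw [Int.ediv_ediv_eq_ediv_mul (by positivity), pow_add]
  rw [Int.emod_def, ← h2]
  ring



theorem pv_getnibble_eq (kk i : Int) (hi : 0 ≤ i) :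
    pvGetnibble kk i = PySem.Int.band (kk >>> (4 * i).toNat) 15 := by
  obtain ⟨t, rfl⟩ := Int.eq_ofNat_of_zero_le hi
  unfold pvGetnibble pvGetbits pvMsb
  simp only []
  rw [show ((↑t * 4 + 3 + 1 : Int)).toNat = 4 * t + 4 from by omega,
      show ((↑t * 4 + 3 + 1 : Int) - ((↑t * 4 + 3) - (↑t * 4) + 1)).toNat = 4 * t from by omega,
      show ((4 * (↑t : Int))).toNat = 4 * t from by omega]
  rw [pv_band_mask, pv_shiftR]
  rw [pv_modDiv kk (4 * t) 4, ← pv_shiftR]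
  rw [show ((2:Int) ^ (4:Nat)) = 16 from by norm_num,
      show (15:Int) = (2:Int) ^ (4:Nat) - 1 from by norm_num, pv_band_mask]
  norm_num

theorem pv_getbit_eq (kk p : Int) (hp : 0 ≤ p) :
    pvGetbit kk p = PySem.Int.band (kk >>> p.toNat) 1 := by
  obtain ⟨t, rfl⟩ := Int.eq_ofNat_of_zero_le hp
  unfold pvGetbit pvGetbits pvMsb
  simp only []
  rw [show ((↑t + 1 : Int)).toNat = t + 1 from by omega,
      show ((↑t + 1 : Int) - ((↑t : Int) - ↑t + 1)).toNat = t from by omega,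
      show ((↑t : Int)).toNat = t from by omega]
  rw [pv_band_mask, pv_shiftR]
  rw [pv_modDiv kk t 1, ← pv_shiftR]
  rw [show ((2:Int) ^ (1:Nat)) = 2 from by norm_num,
      show (1:Int) = (2:Int) ^ (1:Nat) - 1 from by norm_num, pv_band_mask]
  norm_num


-- Nat model of the per-nibble add: process r nibble fields, low to high
def pvS (a : Nat) : Nat → Nat → Nat
  | _, 0 => 0
  | x, r + 1 => (x % 16 + a) % 16 + 16 * pvS a (x / 16) r

-- the loop body of pvAdd with wid = 4, named for the proofs
def pvStepA (a w : Int) (val i : Int) : Int :=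
  PySem.Int.bor
    (PySem.Int.band val (PySem.Int.bxor ((15:Int) <<< i.toNat) ((2:Int) ^ w.toNat - 1)))
    ((PySem.Int.band (pvGetbits val (i + 4 - 1) i + a) 15) <<< i.toNat)

theorem pvAdd_eq_foldl (val a w : Int) :
    pvAdd val a 4 w = List.foldl (pvStepA a w) val (PySem.List.pyRange 0 w 4) := by
  unfold pvAdd pvStepA pvInvert
  simp only [show ((2:Int) ^ (4:Int).toNat - 1) = 15 from by decide]

theorem pv_read (c y t : Nat) (hc : c < 2 ^ (4 * t)) :
    (c + 2 ^ (4 * t) * y) % 2 ^ (4 * t + 4) / 2 ^ (4 * t) = y % 16 := by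
  set P := 2 ^ (4 * t) with hP
  have hPpos : 0 < P := by positivity
  have hpow : (2:Nat) ^ (4 * t + 4) = P * 16 := by rw [pow_add, hP]; norm_num
  have hy : c + P * y = (c + P * (y % 16)) + (P * 16) * (y / 16) := by
    conv_lhs => rw [show y = 16 * (y / 16) + y % 16 from (Nat.div_add_mod y 16).symm]
    ring
  have hlt : c + P * (y % 16) < P * 16 := by
    have h1 : P * (y % 16) ≤ P * 15 := Nat.mul_le_mul_left P (by omega)
    omega
  rw [hpow, hy, Nat.add_mul_mod_self_left, Nat.mod_eq_of_lt hlt,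
      Nat.add_mul_div_left _ _ hPpos, Nat.div_eq_of_lt hc]
  omega

theorem pv_V_lt (c y t wN : Nat) (ht : 4 * t ≤ wN) (hc : c < 2 ^ (4 * t))
    (hy : y < 2 ^ (wN - 4 * t)) : c + 2 ^ (4 * t) * y < 2 ^ wN := by
  have h : 2 ^ (4 * t) * (2 ^ (wN - 4 * t)) = 2 ^ wN := by
    rw [← pow_add]; congr 1; omega
  have h2 : 2 ^ (4 * t) * (y + 1) ≤ 2 ^ (4 * t) * (2 ^ (wN - 4 * t)) :=
    Nat.mul_le_mul_left _ (by omega)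
  rw [h, Nat.mul_succ] at h2
  omega

theorem pv_band_mshift (V t wN : Nat) (hV : V < 2 ^ wN) (ht : 4 * t < wN) :
    V &&& ((15 * 2 ^ (4 * t)) ^^^ (2 ^ wN - 1)) =
      V % 2 ^ (4 * t) + 2 ^ (4 * t + 4) * (V / 2 ^ (4 * t + 4)) := by
  have hVb : ∀ j, wN ≤ j → V.testBit j = false := fun j hj =>
    Nat.testBit_eq_false_of_lt (lt_of_lt_of_le hV (Nat.pow_le_pow_right (by norm_num) hj))
  have hmod : V % 2 ^ (4 * t) < 2 ^ (4 * t + 4) :=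
    lt_of_lt_of_le (Nat.mod_lt V (by positivity)) (Nat.pow_le_pow_right (by norm_num) (by omega))
  apply Nat.eq_of_testBit_eq
  intro j
  rw [add_comm (V % 2 ^ (4 * t)), Nat.testBit_two_pow_mul_add _ hmod,
      show (15 : Nat) * 2 ^ (4 * t) = 2 ^ (4 * t) * 15 from by ring]
  simp only [Nat.testBit_land, Nat.testBit_xor, Nat.testBit_two_pow_sub_one,
    Nat.testBit_two_pow_mul, Nat.testBit_mod_two_pow, Nat.testBit_div_two_pow, ge_iff_le]
  by_cases h1 : j < 4 * t
  · simp [h1, (by omega : j < wN), (by omega : ¬ (4 * t ≤ j)), (by omega : j < 4 * t + 4)]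
  · by_cases h2 : j < 4 * t + 4
    · have h15 : (15 : Nat).testBit (j - 4 * t) = true := by
        rw [show (15:Nat) = 2 ^ 4 - 1 from rfl, Nat.testBit_two_pow_sub_one]
        simp; omega
      by_cases h3 : j < wN
      · simp [h1, h2, h3, h15, (by omega : 4 * t ≤ j)]
      · simp [h1, h2, h3, h15, (by omega : 4 * t ≤ j), hVb j (by omega)]
    · have h15 : (15 : Nat).testBit (j - 4 * t) = false := by
        rw [show (15:Nat) = 2 ^ 4 - 1 from rfl, Nat.testBit_two_pow_sub_one]
        simp; omega
      by_cases h3 : j < wN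
      · simp [h1, h2, h3, h15, (by omega : 4 * t ≤ j),
          show j - (4 * t + 4) + (4 * t + 4) = j from by omega]
      · simp [h1, h2, h3, h15, (by omega : 4 * t ≤ j), hVb j (by omega),
          show j - (4 * t + 4) + (4 * t + 4) = j from by omega]

theorem pv_or_write (c z s t : Nat) (hc : c < 2 ^ (4 * t)) (hs : s < 16) :
    (c + 2 ^ (4 * t + 4) * z) ||| (s * 2 ^ (4 * t)) = c + 2 ^ (4 * t) * (s + 16 * z) := by
  have hc' : c < 2 ^ (4 * t + 4) :=
    lt_of_lt_of_le hc (Nat.pow_le_pow_right (by norm_num) (by omega))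
  apply Nat.eq_of_testBit_eq
  intro j
  rw [add_comm c (2 ^ (4 * t + 4) * z), add_comm c (2 ^ (4 * t) * (s + 16 * z)),
      show (s : Nat) * 2 ^ (4 * t) = 2 ^ (4 * t) * s from by ring]
  rw [Nat.testBit_lor, Nat.testBit_two_pow_mul_add _ hc', Nat.testBit_two_pow_mul_add _ hc,
      Nat.testBit_two_pow_mul]
  by_cases h1 : j < 4 * t
  · simp [h1, (by omega : j < 4 * t + 4), (by omega : ¬ (4 * t ≤ j)), ge_iff_le]
  · have hcb : c.testBit j = false := Nat.testBit_eq_false_of_lt (by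
      calc c < 2 ^ (4 * t) := hc
      _ ≤ 2 ^ j := Nat.pow_le_pow_right (by norm_num) (by omega))
    have hsz : (s + 16 * z).testBit (j - 4 * t)
        = if j - 4 * t < 4 then s.testBit (j - 4 * t) else z.testBit (j - 4 * t - 4) := by
      rw [add_comm s (16 * z), show (16 : Nat) * z = 2 ^ 4 * z from by norm_num,
          Nat.testBit_two_pow_mul_add _ (by omega : s < 2 ^ 4)]
    by_cases h2 : j < 4 * t + 4
    · simp [h1, h2, hcb, hsz, (by omega : 4 * t ≤ j), (by omega : j - 4 * t < 4), ge_iff_le]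
    · have hsb : s.testBit (j - 4 * t) = false := Nat.testBit_eq_false_of_lt (by
        calc s < 16 := hs
        _ = 2 ^ 4 := by norm_num
        _ ≤ 2 ^ (j - 4 * t) := Nat.pow_le_pow_right (by norm_num) (by omega))
      simp [h1, h2, hcb, hsz, hsb, (by omega : 4 * t ≤ j), (by omega : ¬ (j - 4 * t < 4)),
        show j - (4 * t + 4) = j - 4 * t - 4 from by omega, ge_iff_le]
      omega


theorem pv_stepA_closed (aN t c y wN : Nat) (w : Int) (hwN : w.toNat = wN)
    (ht : 4 * t < wN) (hc : c < 2 ^ (4 * t)) (hy : y < 2 ^ (wN - 4 * t)) :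
    pvStepA (↑aN) w (↑(c + 2 ^ (4 * t) * y)) (4 * (↑t : Int))
      = ↑(c + 2 ^ (4 * t) * (((y % 16 + aN) % 16) + 16 * (y / 16))) := by
  set V := c + 2 ^ (4 * t) * y with hV
  have hVlt : V < 2 ^ wN := pv_V_lt c y t wN (by omega) hc hy
  unfold pvStepA pvGetbits pvMsb
  simp only [hwN]
  rw [show ((4 * (↑t : Int) + 4 - 1) + 1).toNat = 4 * t + 4 from by omega,
      show (((4 * (↑t : Int) + 4 - 1) + 1) - ((4 * (↑t:Int) + 4 - 1) - (4 * ↑t) + 1)).toNat = 4 * t from by omega,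
      show ((4 * (↑t : Int))).toNat = 4 * t from by omega]
  -- the read
  rw [pv_band_mask, pv_shiftR]
  rw [show ((↑V : Int) % (2:Int) ^ (4 * t + 4)) = ↑(V % 2 ^ (4 * t + 4)) from by
        rw [pv_pow_cast, ← Int.natCast_mod],
      show ((2:Int) ^ (4 * t)) = ((2 ^ (4 * t) : Nat) : Int) from pv_pow_cast _,
      ← Int.natCast_ediv, pv_read c y t hc]
  -- the written nibble
  rw [show ((↑(y % 16) : Int) + ↑aN) = ↑(y % 16 + aN) from by push_cast; ring,
      show (15:Int) = (2:Int) ^ (4:Nat) - 1 from by norm_num, pv_band_mask,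
      show ((↑(y % 16 + aN) : Int) % (2:Int) ^ (4:Nat)) = ↑((y % 16 + aN) % 16) from by
        rw [pv_pow_cast, ← Int.natCast_mod]; norm_num]
  set s := (y % 16 + aN) % 16 with hs
  have hs16 : s < 16 := Nat.mod_lt _ (by norm_num)
  rw [Int.shiftLeft_eq, Int.shiftLeft_eq]
  -- the mask
  rw [show ((2:Int) ^ (4:Nat) - 1) = 15 from by norm_num]
  rw [show ((15:Int) * 2 ^ (4 * t)) = ((15 * 2 ^ (4 * t) : Nat) : Int) from by
        rw [pv_pow_cast]; push_cast; ring,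
      pv_mask_cast wN,
      PySem.Int.bxor_of_nonneg (by positivity) (by positivity)]
  simp only [Int.toNat_natCast]
  rw [PySem.Int.band_of_nonneg (by positivity) (by positivity)]
  simp only [Int.toNat_natCast]
  rw [pv_band_mshift V t wN hVlt ht]
  have hmodc : V % 2 ^ (4 * t) = c := by
    rw [hV, Nat.add_mul_mod_self_left, Nat.mod_eq_of_lt hc]
  have hdivy : V / 2 ^ (4 * t + 4) = y / 16 := by
    rw [hV, pow_add, show ((2:Nat) ^ 4) = 16 from by norm_num, ← Nat.div_div_eq_div_mul,
        Nat.add_mul_div_left _ _ (by positivity : 0 < 2 ^ (4 * t)), Nat.div_eq_of_lt hc]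
    omega
  rw [hmodc, hdivy]
  rw [show ((↑s : Int) * 2 ^ (4 * t)) = ((s * 2 ^ (4 * t) : Nat) : Int) from by
        rw [pv_pow_cast]; push_cast; ring]
  rw [PySem.Int.bor_of_nonneg (by positivity) (by positivity)]
  simp only [Int.toNat_natCast]
  rw [pv_or_write c (y / 16) s t hc hs16]

theorem pv_foldA (aN wN : Nat) (w : Int) (hwN : w.toNat = wN) :
    ∀ (r t c y : Nat), wN ≤ 4 * (t + r) → 4 * (t + r) < wN + 4 →
      c < 2 ^ (4 * t) → y < 2 ^ (wN - 4 * t) →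
      List.foldl (pvStepA ↑aN w) (↑(c + 2 ^ (4 * t) * y))
          ((List.range r).map (fun (j : Nat) => (4 * ((t : Int) + (j : Int)))))
        = ↑(c + 2 ^ (4 * t) * pvS aN y r) := by
  intro r
  induction r with
  | zero =>
    intro t c y h1 h2 hc hy
    have hy0 : y = 0 := by
      have : wN - 4 * t = 0 := by omega
      rw [this] at hy; omega
    simp [hy0, pvS]
  | succ r ih =>
    intro t c y h1 h2 hc hy
    rw [List.range_succ_eq_map, List.map_cons, List.map_map, List.foldl_cons]
    rw [show (4 * ((t : Int) + ((0:Nat) : Int))) = 4 * ((t:Int)) from by push_cast; ring]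
    rw [pv_stepA_closed aN t c y wN w hwN (by omega) hc hy]
    set s := (y % 16 + aN) % 16 with hs
    have hs16 : s < 16 := Nat.mod_lt _ (by norm_num)
    have hpow : (2:Nat) ^ (4 * (t + 1)) = 2 ^ (4 * t) * 16 := by
      rw [show 4 * (t + 1) = 4 * t + 4 from by omega, pow_add]; norm_num
    have hstate : c + 2 ^ (4 * t) * (s + 16 * (y / 16))
        = (c + 2 ^ (4 * t) * s) + 2 ^ (4 * (t + 1)) * (y / 16) := by
      rw [hpow]; ring
    have hc' : c + 2 ^ (4 * t) * s < 2 ^ (4 * (t + 1)) := by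
      have h3 : 2 ^ (4 * t) * s ≤ 2 ^ (4 * t) * 15 := Nat.mul_le_mul_left _ (by omega)
      have h4 : (2:Nat) ^ (4 * t) * 16 = 2 ^ (4 * t) * 15 + 2 ^ (4 * t) := by ring
      omega
    have hy' : y / 16 < 2 ^ (wN - 4 * (t + 1)) := by
      by_cases hcase : 4 * t + 4 ≤ wN
      · have he : wN - 4 * t = (wN - 4 * (t + 1)) + 4 := by omega
        rw [Nat.div_lt_iff_lt_mul (by norm_num : (0:Nat) < 16)]
        calc y < 2 ^ (wN - 4 * t) := hy
        _ = 2 ^ (wN - 4 * (t + 1)) * 16 := by rw [he, pow_add]; norm_num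
      · have : (2:Nat) ^ (wN - 4 * t) ≤ 2 ^ 3 := Nat.pow_le_pow_right (by norm_num) (by omega)
        have : y / 16 = 0 := Nat.div_eq_of_lt (by omega)
        rw [this]; positivity
    have hmapeq : ((List.range r).map ((fun (j : Nat) => (4 * ((t : Int) + (j : Int)))) ∘ Nat.succ))
        = (List.range r).map (fun (j : Nat) => (4 * (((t + 1 : Nat) : Int) + (j : Int)))) := by
      apply List.map_congr_left
      intro j _
      simp only [Function.comp_apply, Nat.succ_eq_add_one]
      push_cast; ring
    rw [hstate, hmapeq, ih (t + 1) (c + 2 ^ (4 * t) * s) (y / 16) (by omega) (by omega) hc' hy']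
    have : pvS aN y (r + 1) = s + 16 * pvS aN (y / 16) r := by
      rw [pvS, hs]
    rw [this, hpow]
    push_cast
    ring

theorem pv_step0 (aN : Nat) (w v : Int) (hw : 4 ≤ w.toNat) :
    pvStepA (↑aN) w v 0 = pvStepA (↑aN) w (v % (2:Int) ^ w.toNat) 0 := by
  set wN := w.toNat with hwN
  have hdvd : ((2:Int) ^ (4:Nat)) ∣ (2:Int) ^ wN := pow_dvd_pow 2 hw
  unfold pvStepA pvGetbits pvMsb
  simp only []
  rw [show ((0:Int) + 4 - 1 + 1).toNat = 4 from by decide,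
      show (((0:Int) + 4 - 1 + 1) - ((0 + 4 - 1) - 0 + 1)).toNat = 0 from by decide,
      show ((0:Int)).toNat = 0 from rfl]
  rw [pv_band_mask v 4, pv_band_mask (v % 2 ^ wN) 4]
  rw [Int.emod_emod_of_dvd v hdvd]
  -- the masked-band part
  have h15 : (15 : Int) <<< (0:Nat) = ((15:Nat) : Int) := by decide
  rw [h15, pv_mask_cast wN, PySem.Int.bxor_of_nonneg (by positivity) (by positivity)]
  simp only [Int.toNat_natCast]
  have hM : (15 : Nat) ^^^ (2 ^ wN - 1) < 2 ^ wN := by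
    apply Nat.xor_lt_two_pow
    · calc (15:Nat) < 2 ^ 4 := by norm_num
      _ ≤ 2 ^ wN := Nat.pow_le_pow_right (by norm_num) hw
    · have := Nat.one_le_two_pow (n := wN); omega
  rw [pv_band_low v _ wN hM]

theorem pvAdd_closed (v a w : Int) (hw4 : 4 ≤ w) (ha : 0 ≤ a) :
    pvAdd v a 4 w = ↑(pvS a.toNat (v % (2:Int) ^ w.toNat).toNat ((w.toNat + 3) / 4)) := by
  set wN := w.toNat with hwN
  have hw : 4 ≤ wN := by omega
  set K := (wN + 3) / 4 with hK
  have hK1 : 1 ≤ K := by omega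
  set x := (v % (2:Int) ^ wN).toNat with hx
  have hxv : ((x : Nat) : Int) = v % (2:Int) ^ wN :=
    Int.toNat_of_nonneg (Int.emod_nonneg v (by positivity))
  have hxlt : x < 2 ^ wN := by
    have h1 : v % (2:Int) ^ wN < (2:Int) ^ wN := Int.emod_lt_of_pos v (by positivity)
    have h2 : ((2:Int) ^ wN) = (((2 ^ wN : Nat)) : Int) := pv_pow_cast wN
    omega
  obtain ⟨aN, rfl⟩ := Int.eq_ofNat_of_zero_le ha
  rw [pvAdd_eq_foldl]
  have hweq : w = ((wN : Nat) : Int) := (Int.toNat_of_nonneg (by omega : (0:Int) ≤ w)).symm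
  have hlist : PySem.List.pyRange 0 w 4
      = (List.range K).map (fun (j : Nat) => (4 * ((0:Int) + (j : Int)))) := by
    rw [PySem.List.pyRange_of_pos 0 w (by norm_num)]
    rw [if_pos (by omega : (0:Int) < w)]
    have h1 : ((w - 0 + 4 - 1) / 4).toNat = K := by
      rw [show w - 0 + 4 - 1 = (((wN + 3 : Nat)) : Int) from by rw [hweq]; push_cast; ring,
          show (4:Int) = ((4:Nat):Int) from rfl, ← Int.natCast_ediv, Int.toNat_natCast, hK]
    rw [h1]
    apply List.map_congr_left
    intro j _
    ring
  rw [hlist, show K = (K - 1) + 1 from by omega, List.range_succ_eq_map,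
      List.map_cons, List.foldl_cons, List.map_map]
  rw [show (4 * ((0:Int) + ((0:Nat) : Int))) = (0:Int) from by norm_num]
  rw [pv_step0 aN w v hw]
  rw [← hxv]
  have h0' := pv_stepA_closed aN 0 0 x wN w hwN.symm (by omega) (by norm_num)
    (by simpa using hxlt)
  simp only [Nat.cast_zero, Nat.mul_zero, mul_zero, pow_zero, one_mul, zero_add] at h0'
  rw [h0']
  have hmapeq : ((List.range (K - 1)).map ((fun (j : Nat) => (4 * ((0 : Int) + (j : Int)))) ∘ Nat.succ))
      = (List.range (K - 1)).map (fun (j : Nat) => (4 * (((1 : Nat) : Int) + (j : Int)))) := by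
    apply List.map_congr_left
    intro j _
    simp only [Function.comp_apply, Nat.succ_eq_add_one]
    push_cast; ring
  have hstate : ((x % 16 + aN) % 16 + 16 * (x / 16))
      = ((x % 16 + aN) % 16) + 2 ^ (4 * 1) * (x / 16) := by norm_num
  have hc1 : (x % 16 + aN) % 16 < 2 ^ (4 * 1) := by
    have := Nat.mod_lt (x % 16 + aN) (y := 16) (by norm_num : 0 < 16)
    omega
  have hy1 : x / 16 < 2 ^ (wN - 4 * 1) := by
    rw [Nat.div_lt_iff_lt_mul (by norm_num : (0:Nat) < 16)]
    calc x < 2 ^ wN := hxlt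
    _ = 2 ^ (wN - 4 * 1) * 16 := by
        rw [show wN = (wN - 4 * 1) + 4 from by omega, pow_add]
        norm_num
  rw [hmapeq, hstate, pv_foldA aN wN w hwN.symm (K - 1) 1 _ _ (by omega) (by omega) hc1 hy1]
  simp only [Int.toNat_natCast]
  rw [show pvS aN x ((K - 1) + 1) = (x % 16 + aN) % 16 + 16 * pvS aN (x / 16) (K - 1) from by rw [pvS]]
  norm_num


-- B side: the SWAR nibble add over K 4-bit fields
def pvRep : Nat → Nat
  | 0 => 0
  | K + 1 => 16 * pvRep K + 1

theorem pv_rep15 (K : Nat) : 15 * pvRep K = 16 ^ K - 1 := by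
  induction K with
  | zero => simp [pvRep]
  | succ K ih =>
    have hp : (16:Nat) ^ (K + 1) = 16 ^ K * 16 := by rw [pow_succ]
    have h1 : (1:Nat) ≤ 16 ^ K := Nat.one_le_pow _ _ (by norm_num)
    simp only [pvRep]
    omega

theorem pv_repDiv (K : Nat) : (16 ^ K - 1) / 15 = pvRep K := by
  rw [← pv_rep15 K, Nat.mul_div_cancel_left _ (by norm_num)]

theorem pv_ldiff_le (a b : Nat) : a.ldiff b ≤ a := by
  have h1 := pv_ldiff_add a b
  omega

theorem pv_split_and (A u B v : Nat) (hu : u < 16) (hv : v < 16) :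
    (16 * A + u) &&& (16 * B + v) = 16 * (A &&& B) + (u &&& v) := by
  have hlow : u &&& v < 16 := lt_of_le_of_lt Nat.and_le_left hu
  apply Nat.eq_of_testBit_eq
  intro j
  simp only [show (16:Nat) = 2 ^ 4 from by norm_num]
  rw [Nat.testBit_land, Nat.testBit_two_pow_mul_add _ (by omega : u < 2 ^ 4),
      Nat.testBit_two_pow_mul_add _ (by omega : v < 2 ^ 4),
      Nat.testBit_two_pow_mul_add _ (by omega : u &&& v < 2 ^ 4)]
  by_cases hj : j < 4 <;> simp [hj, Nat.testBit_land]

theorem pv_split_xor (A u B v : Nat) (hu : u < 16) (hv : v < 16) :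
    (16 * A + u) ^^^ (16 * B + v) = 16 * (A ^^^ B) + (u ^^^ v) := by
  have hlow : u ^^^ v < 16 := by
    have := Nat.xor_lt_two_pow (n := 4) (by omega : u < 2 ^ 4) (by omega : v < 2 ^ 4)
    omega
  apply Nat.eq_of_testBit_eq
  intro j
  simp only [show (16:Nat) = 2 ^ 4 from by norm_num]
  rw [Nat.testBit_xor, Nat.testBit_two_pow_mul_add _ (by omega : u < 2 ^ 4),
      Nat.testBit_two_pow_mul_add _ (by omega : v < 2 ^ 4),
      Nat.testBit_two_pow_mul_add _ (by omega : u ^^^ v < 2 ^ 4)]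
  by_cases hj : j < 4 <;> simp [hj, Nat.testBit_xor]

theorem pv_split_ldiff (A u B v : Nat) (hu : u < 16) (hv : v < 16) :
    (16 * A + u).ldiff (16 * B + v) = 16 * (A.ldiff B) + (u.ldiff v) := by
  have hlow : u.ldiff v < 16 := lt_of_le_of_lt (pv_ldiff_le u v) hu
  apply Nat.eq_of_testBit_eq
  intro j
  simp only [show (16:Nat) = 2 ^ 4 from by norm_num]
  rw [Nat.testBit_ldiff, Nat.testBit_two_pow_mul_add _ (by omega : u < 2 ^ 4),
      Nat.testBit_two_pow_mul_add _ (by omega : v < 2 ^ 4),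
      Nat.testBit_two_pow_mul_add _ (by omega : u.ldiff v < 2 ^ 4)]
  by_cases hj : j < 4 <;> simp [hj, Nat.testBit_ldiff]

theorem pv_ldiff8_le (u : Nat) (hu : u < 16) : u.ldiff 8 ≤ 7 := by
  rw [← pv_sub_and]
  exact (by decide : ∀ u < 16, u - (u &&& 8) ≤ 7) u hu

theorem pv_low (u : Nat) (hu : u < 16) (a : Nat) (ha9 : a < 9) (ha1 : 1 ≤ a) :
    ((u.ldiff 8) + (a.ldiff 8)) ^^^ ((u ^^^ a) &&& 8) = (u + a) % 16 := by
  rw [← pv_sub_and u 8, ← pv_sub_and a 8]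
  exact (by decide : ∀ u < 16, ∀ a < 9, 1 ≤ a →
    ((u - (u &&& 8)) + (a - (a &&& 8))) ^^^ ((u ^^^ a) &&& 8) = (u + a) % 16) u hu a ha9 ha1

theorem pv_swar (aN : Nat) (ha1 : 1 ≤ aN) (ha8 : aN ≤ 8) :
    ∀ K x, x < 16 ^ K →
    ((x.ldiff (8 * pvRep K)) + ((aN * pvRep K).ldiff (8 * pvRep K)))
        ^^^ ((x ^^^ aN * pvRep K) &&& (8 * pvRep K)) = pvS aN x K := by
  intro K
  induction K with
  | zero =>
    intro x hx
    have hx0 : x = 0 := by simpa using hx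
    subst hx0
    have hz : ∀ m : Nat, m.ldiff 0 = m := by
      intro m
      have h1 := pv_sub_and m 0
      simp at h1 ⊢
      omega
    simp [pvRep, pvS, hz]
  | succ K ih =>
    intro x hx
    set A := x / 16 with hA
    set u := x % 16 with hu
    have hu16 : u < 16 := Nat.mod_lt _ (by norm_num)
    have hxs : x = 16 * A + u := by rw [hA, hu]; omega
    have hAlt : A < 16 ^ K := by
      rw [hA, Nat.div_lt_iff_lt_mul (by norm_num : (0:Nat) < 16)]
      calc x < 16 ^ (K + 1) := hx
      _ = 16 ^ K * 16 := by rw [pow_succ]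
    set R := pvRep K with hR
    have hrep : pvRep (K + 1) = 16 * R + 1 := by rw [pvRep]
    have hH : 8 * pvRep (K + 1) = 16 * (8 * R) + 8 := by rw [hrep]; ring
    have hb : aN * pvRep (K + 1) = 16 * (aN * R) + aN := by rw [hrep]; ring
    have hT1 : x.ldiff (8 * pvRep (K + 1)) = 16 * (A.ldiff (8 * R)) + u.ldiff 8 := by
      rw [hxs, hH, pv_split_ldiff _ _ _ _ hu16 (by norm_num)]
    have hT2 : (aN * pvRep (K + 1)).ldiff (8 * pvRep (K + 1))
        = 16 * ((aN * R).ldiff (8 * R)) + aN.ldiff 8 := by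
      rw [hb, hH, pv_split_ldiff _ _ _ _ (by omega) (by norm_num)]
    have hT3 : x ^^^ aN * pvRep (K + 1) = 16 * (A ^^^ aN * R) + (u ^^^ aN) := by
      rw [hxs, hb, pv_split_xor _ _ _ _ hu16 (by omega)]
    have huxa : u ^^^ aN < 16 := by
      have := Nat.xor_lt_two_pow (n := 4) (by omega : u < 2 ^ 4) (by omega : aN < 2 ^ 4)
      omega
    have hT4 : (x ^^^ aN * pvRep (K + 1)) &&& (8 * pvRep (K + 1))
        = 16 * ((A ^^^ aN * R) &&& (8 * R)) + ((u ^^^ aN) &&& 8) := by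
      rw [hT3, hH, pv_split_and _ _ _ _ huxa (by norm_num)]
    have hl1 : u.ldiff 8 + aN.ldiff 8 < 16 := by
      have h1 := pv_ldiff8_le u hu16
      have h2 := pv_ldiff8_le aN (by omega)
      omega
    have hl2 : (u ^^^ aN) &&& 8 < 16 := lt_of_le_of_lt Nat.and_le_right (by norm_num)
    have hsum : x.ldiff (8 * pvRep (K + 1)) + (aN * pvRep (K + 1)).ldiff (8 * pvRep (K + 1))
        = 16 * (A.ldiff (8 * R) + (aN * R).ldiff (8 * R)) + (u.ldiff 8 + aN.ldiff 8) := by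
      rw [hT1, hT2]; ring
    rw [hsum, hT4, pv_split_xor _ _ _ _ hl1 hl2,
        ih A hAlt, pv_low u hu16 aN (by omega) ha1]
    have : pvS aN x (K + 1) = (x % 16 + aN) % 16 + 16 * pvS aN (x / 16) K := by rw [pvS]
    rw [this, ← hA, ← hu]
    omega


-- add command bounds: cmd & 7 + 1 is in [1, 8]
theorem pv_ac_bounds (C : Int) : 1 ≤ PySem.Int.band C 7 + 1 ∧ PySem.Int.band C 7 + 1 ≤ 8 := by
  have h : PySem.Int.band C 7 = C % (2:Int) ^ (3:Nat) := by
    rw [show (7:Int) = (2:Int) ^ (3:Nat) - 1 from by norm_num, pv_band_mask]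
  have h1 : 0 ≤ C % (2:Int) ^ (3:Nat) := Int.emod_nonneg C (by positivity)
  have h2 : C % (2:Int) ^ (3:Nat) < 2 ^ (3:Nat) := Int.emod_lt_of_pos C (by positivity)
  norm_num at h2
  omega

-- B's SWAR block computes the same nibble-map as A's add loop
theorem pv_bswar (acc C isize : Int) (h4 : 4 ≤ isize) :
    PySem.Int.bxor
      (PySem.Int.band (PySem.Int.band acc (((1:Int) <<< isize.toNat) - 1))
          (Int.not ((8:Int) * PySem.Int.floordiv (((1:Int) <<< (4 * PySem.Int.floordiv (isize + 3) 4).toNat) - 1) 15))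
        + PySem.Int.band ((PySem.Int.band C 7 + (1:Int)) * PySem.Int.floordiv (((1:Int) <<< (4 * PySem.Int.floordiv (isize + 3) 4).toNat) - 1) 15)
          (Int.not ((8:Int) * PySem.Int.floordiv (((1:Int) <<< (4 * PySem.Int.floordiv (isize + 3) 4).toNat) - 1) 15)))
      (PySem.Int.band
        (PySem.Int.bxor (PySem.Int.band acc (((1:Int) <<< isize.toNat) - 1))
          ((PySem.Int.band C 7 + (1:Int)) * PySem.Int.floordiv (((1:Int) <<< (4 * PySem.Int.floordiv (isize + 3) 4).toNat) - 1) 15))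
        ((8:Int) * PySem.Int.floordiv (((1:Int) <<< (4 * PySem.Int.floordiv (isize + 3) 4).toNat) - 1) 15))
    = ↑(pvS (PySem.Int.band C 7 + (1:Int)).toNat (acc % (2:Int) ^ isize.toNat).toNat
        ((isize.toNat + 3) / 4)) := by
  set wN := isize.toNat with hwN
  have hw : 4 ≤ wN := by omega
  set K := (wN + 3) / 4 with hK
  set x := (acc % (2:Int) ^ wN).toNat with hx
  have hxv : ((x : Nat) : Int) = acc % (2:Int) ^ wN :=
    Int.toNat_of_nonneg (Int.emod_nonneg acc (by positivity))
  have hxlt : x < 2 ^ wN := by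
    have h1 : acc % (2:Int) ^ wN < (2:Int) ^ wN := Int.emod_lt_of_pos acc (by positivity)
    have h2 : ((2:Int) ^ wN) = (((2 ^ wN : Nat)) : Int) := pv_pow_cast wN
    omega
  have hweq : isize = ((wN : Nat) : Int) := (Int.toNat_of_nonneg (by omega)).symm
  obtain ⟨hac1, hac8⟩ := pv_ac_bounds C
  set ac := PySem.Int.band C 7 + (1:Int) with hac
  set aN := ac.toNat with haN
  have hacv : ((aN : Nat) : Int) = ac := Int.toNat_of_nonneg (by omega)
  have haN1 : 1 ≤ aN := by omega
  have haN8 : aN ≤ 8 := by omega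
  -- the chunk count and the broadcast constants
  have hch : PySem.Int.floordiv (isize + 3) 4 = ((K : Nat) : Int) := by
    rw [PySem.Int.floordiv_eq_ediv_of_pos (by norm_num)]
    rw [show isize + 3 = (((wN + 3 : Nat)) : Int) from by rw [hweq]; push_cast; ring,
        show (4:Int) = ((4:Nat) : Int) from rfl, ← Int.natCast_ediv, hK]
  have h4ch : (4 * PySem.Int.floordiv (isize + 3) 4).toNat = 4 * K := by
    rw [hch]; omega
  have hrep : PySem.Int.floordiv (((1:Int) <<< (4 * PySem.Int.floordiv (isize + 3) 4).toNat) - 1) 15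
      = ((pvRep K : Nat) : Int) := by
    rw [h4ch, Int.shiftLeft_eq, one_mul, PySem.Int.floordiv_eq_ediv_of_pos (by norm_num),
        pv_mask_cast (4 * K), show (15:Int) = ((15:Nat) : Int) from rfl, ← Int.natCast_ediv]
    rw [show (2:Nat) ^ (4 * K) = 16 ^ K from by rw [pow_mul]; norm_num, pv_repDiv]
  have hfull : ((1:Int) <<< wN) - 1 = (2:Int) ^ wN - 1 := by rw [Int.shiftLeft_eq, one_mul]
  have hxint : PySem.Int.band acc (((1:Int) <<< wN) - 1) = ((x : Nat) : Int) := by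
    rw [hfull, pv_band_mask, hxv]
  have hbint : ac * PySem.Int.floordiv (((1:Int) <<< (4 * PySem.Int.floordiv (isize + 3) 4).toNat) - 1) 15
      = (((aN * pvRep K : Nat)) : Int) := by
    rw [hrep, ← hacv]; push_cast; ring
  have hhigh : (8:Int) * PySem.Int.floordiv (((1:Int) <<< (4 * PySem.Int.floordiv (isize + 3) 4).toNat) - 1) 15
      = (((8 * pvRep K : Nat)) : Int) := by
    rw [hrep]; push_cast; ring
  rw [hxint, hbint, hhigh]
  rw [PySem.Int.bxor_of_nonneg (a := ((x : Nat) : Int)) (b := ((aN * pvRep K : Nat) : Int))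
      (Int.natCast_nonneg _) (Int.natCast_nonneg _)]
  simp only [Int.toNat_natCast]
  rw [PySem.Int.band_of_nonneg (a := ((x ^^^ aN * pvRep K : Nat) : Int))
      (b := ((8 * pvRep K : Nat) : Int)) (Int.natCast_nonneg _) (Int.natCast_nonneg _)]
  simp only [Int.toNat_natCast]
  rw [pv_band_not _ _ (Int.natCast_nonneg _) (Int.natCast_nonneg _),
      pv_band_not _ _ (Int.natCast_nonneg _) (Int.natCast_nonneg _)]
  simp only [Int.toNat_natCast]
  rw [show ((((x.ldiff (8 * pvRep K)) : Nat) : Int) + (((aN * pvRep K).ldiff (8 * pvRep K) : Nat) : Int))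
        = ((((x.ldiff (8 * pvRep K)) + (aN * pvRep K).ldiff (8 * pvRep K) : Nat)) : Int) from by push_cast; ring]
  rw [PySem.Int.bxor_of_nonneg (Int.natCast_nonneg _) (Int.natCast_nonneg _)]
  simp only [Int.toNat_natCast]
  have hx16 : x < 16 ^ K := by
    calc x < 2 ^ wN := hxlt
    _ ≤ 2 ^ (4 * K) := Nat.pow_le_pow_right (by norm_num) (by omega)
    _ = 16 ^ K := by rw [pow_mul]; norm_num
  rw [pv_swar aN haN1 haN8 K x hx16]

-- one round of A equals one round of B
theorem pv_body_eq (k isize : Int) (h4 : 4 ≤ isize) (acc i : Int) (hi : 0 ≤ i) :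
    (let c := pvGetcmd k i isize
     let rot_cmd := c.1
     let inv_cmd := c.2.1
     let add_cmd := c.2.2.2
     let v1 := pvAdd acc add_cmd 4 isize
     let v2 := pvRotl v1 rot_cmd isize
     let v3 := if inv_cmd == 0 then pvInvert v2 isize else v2
     PySem.Int.bxor v3 k)
    = (let ptr := PySem.Int.band (k >>> (4 * i).toNat) 15
       let cmd := PySem.Int.band (k >>> (4 * ptr).toNat) 15 + 1
       let rot_cmd := PySem.List.pyGetD pvPrimeListB cmd 0
       let add_cmd := PySem.Int.band cmd 0x7 + 1
       let inv_cmd := PySem.Int.band (k >>> (PySem.Int.mod (cmd * 3) isize).toNat) 1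
       let chunks := PySem.Int.floordiv (isize + 3) 4
       let full := ((1:Int) <<< isize.toNat) - 1
       let rep := PySem.Int.floordiv (((1:Int) <<< (4 * chunks).toNat) - 1) 15
       let high := (8:Int) * rep
       let x := PySem.Int.band acc full
       let b := add_cmd * rep
       let va := PySem.Int.bxor
         (PySem.Int.band x (Int.not high) + PySem.Int.band b (Int.not high))
         (PySem.Int.band (PySem.Int.bxor x b) high)
       let t := va <<< rot_cmd.toNat
       let vr := PySem.Int.bor (PySem.Int.band t full) (t >>> isize.toNat)
       let vi := if inv_cmd == 0 then PySem.Int.bxor vr full else vr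
       PySem.Int.bxor vi k) := by
  simp only []
  have hptr : pvGetnibble k i = PySem.Int.band (k >>> (4 * i).toNat) 15 := pv_getnibble_eq k i hi
  have hPn : 0 ≤ PySem.Int.band (k >>> (4 * i).toNat) 15 := by
    rw [show (15:Int) = (2:Int) ^ (4:Nat) - 1 from by norm_num, pv_band_mask]
    exact Int.emod_nonneg _ (by positivity)
  set C := PySem.Int.band (k >>> (4 * PySem.Int.band (k >>> (4 * i).toNat) 15).toNat) 15 + 1 with hCdef
  have hcmd : pvGetnibble k (pvGetnibble k i) + 1 = C := by
    rw [hptr, pv_getnibble_eq k _ hPn]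
  have h1 : (pvGetcmd k i isize).1 = pvPrime C := by
    unfold pvGetcmd; simp only []; rw [hcmd]
  have h2 : (pvGetcmd k i isize).2.1
      = PySem.Int.band (k >>> (PySem.Int.mod (C * 3) isize).toNat) 1 := by
    unfold pvGetcmd; simp only []; rw [hcmd]
    exact pv_getbit_eq k _ (PySem.Int.mod_nonneg _ (by omega))
  have h3 : (pvGetcmd k i isize).2.2.2 = PySem.Int.band C 7 + 1 := by
    unfold pvGetcmd; simp only []; rw [hcmd]
  rw [h1, h2, h3]
  -- the two nibble adds agree
  obtain ⟨hac1, hac8⟩ := pv_ac_bounds C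
  have hadd : pvAdd acc (PySem.Int.band C 7 + 1) 4 isize
      = ↑(pvS (PySem.Int.band C 7 + (1:Int)).toNat (acc % (2:Int) ^ isize.toNat).toNat
          ((isize.toNat + 3) / 4)) := by
    rw [pvAdd_closed acc _ isize h4 (by omega)]
  rw [hadd, ← pv_bswar acc C isize h4]
  -- the rotate, invert and xor are the same computation
  have hrot : pvPrime C = PySem.List.pyGetD pvPrimeListB C 0 := rfl
  have hfull : ((1:Int) <<< isize.toNat) - 1 = (2:Int) ^ isize.toNat - 1 := by
    rw [Int.shiftLeft_eq, one_mul]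
  unfold pvRotl pvInvert
  rw [hrot, hfull]

theorem jumble_eq_alt (v k n isize : Int) (id : String)
    (h4 : 4 ≤ isize ∨ n ≤ 0) : jumble v k n isize id = jumble_alt v k n isize id := by
  unfold jumble jumble_alt
  by_cases hn : n ≤ 0
  · rw [show PySem.List.pyRange 0 n 1 = [] from by
      rw [PySem.List.pyRange_of_pos 0 n (by norm_num), if_neg (by omega)]; rfl]
    rfl
  · have h4' : 4 ≤ isize := by tauto
    apply PySem.List.foldl_congr_mem
    intro acc x hx
    have hx0 : 0 ≤ x := by
      have := (PySem.List.mem_pyRange_iff_of_pos (a := 0) (b := n) (s := 1) (by norm_num) x).mp hx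
      omega
    simp only [Int.shiftRight_natCast_right, Int.shiftLeft_natCast_right]
    exact pv_body_eq k isize h4' acc x hx0

-- ===== VERDICT (by name: the statement is the Claim_ definition above) =====
theorem jumble_spec : Claim_equal_jumble := by
  intro v k n isize id _hd hp
  exact jumble_eq_alt v k n isize id (by unfold Pre_jumble at hp; tauto)
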